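-- pv_equiv track=rewrite | github.com/muneebaifrah/Unstop-100-Days-Coding-Sprint | Day-61/1.Communication_Channel.py | count_distinct_network_designs
-- ===== SOURCE A (Python) =====
-- MOD = 10**9 + 7
--
-- def count_distinct_network_designs(N, K):
--     M = N - 1  # number of star edges (1 to others)
--     if M == 0:
--         return 1
--
--     maxE = M * (M - 1) // 2  # maximum possible exponent used below
--
--     # factorials for nCr up to M
--     fact = [1] * (M + 1)
--     for i in range(1, M + 1):
--         fact[i] = fact[i - 1] * i % MOD
--
--     invfact = [1] * (M + 1)
--     invfact[M] = pow(fact[M], MOD - 2, MOD)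
--     for i in range(M, 0, -1):
--         invfact[i - 1] = invfact[i] * i % MOD
--
--     def nCr(n, r):
--         if r < 0 or r > n:
--             return 0
--         return fact[n] * invfact[r] % MOD * invfact[n - r] % MOD
--
--     # dp[p] = ways after assigning some weights, where p vertices have been assigned star weights so far
--     dp = [0] * (M + 1)
--     dp[0] = 1
--
--     # Iterate star weight value t = 1..K
--     # base(t) = number of choices for a non-star edge whose max endpoint-star-weight == t
--     for t in range(1, K + 1):
--         base = K - t + 1  # in [1..K]
--
--         # Precompute base^e for e=0..maxE in O(maxE)
--         pow_base = [1] * (maxE + 1)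
--         for e in range(1, maxE + 1):
--             pow_base[e] = (pow_base[e - 1] * base) % MOD
--
--         dp2 = [0] * (M + 1)
--         for p_old in range(M + 1):
--             if dp[p_old] == 0:
--                 continue
--             remaining = M - p_old
--
--             # choose c vertices to have star-weight exactly t
--             for c in range(remaining + 1):
--                 # number of pairs (u,v) whose max star-weight becomes exactly t contributed at this step:
--                 # c * p_old  (pairs between new vertices and previous vertices)
--                 # + C(c,2)   (pairs within the new vertices)
--                 e = c * p_old + (c * (c - 1)) // 2
--
--                 ways = dp[p_old]
--                 ways = ways * nCr(remaining, c) % MOD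
--                 ways = ways * pow_base[e] % MOD
--
--                 dp2[p_old + c] = (dp2[p_old + c] + ways) % MOD
--
--         dp = dp2
--
--     return dp[M]
-- ===== SOURCE B (Python) =====
-- MOD = 10**9 + 7
--
-- def count_distinct_network_designs(N, K):
--     M = N - 1
--     if M == 0:
--         return 1
--
--     # same prelude as the original: factorials + inverse factorials for nCr
--     fact = [1] * (M + 1)
--     for i in range(1, M + 1):
--         fact[i] = fact[i - 1] * i % MOD
--
--     invfact = [1] * (M + 1)
--     invfact[M] = pow(fact[M], MOD - 2, MOD)
--     for i in range(M, 0, -1):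
--         invfact[i - 1] = invfact[i] * i % MOD
--
--     def nCr(n, r):
--         if r < 0 or r > n:
--             return 0
--         return fact[n] * invfact[r] % MOD * invfact[n - r] % MOD
--
--     # backward DP: g[p] = number of ways to weight the remaining M-p leaves
--     # (and the non-star pairs they dominate) using only values > the current t.
--     g = [0] * (M + 1)
--     g[M] = 1
--     for t in range(K, 0, -1):
--         base = K - t + 1
--         g2 = []
--         for p in range(M + 1):
--             s = 0
--             w = 1                       # w == base ** (c*p + c*(c-1)//2) mod MOD
--             mult = pow(base, p, MOD)    # mult == base ** (p + c) mod MOD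
--             for c in range(M - p + 1):
--                 s = (s + nCr(M - p, c) * w % MOD * g[p + c]) % MOD
--                 w = w * mult % MOD
--                 mult = mult * base % MOD
--             g2.append(s)
--         g = g2
--     return g[0]
-- ===== Notes on version B (the rewrite author's own statement) =====
-- stated objective: alternative
-- what changed: B keeps the fact/invfact/nCr prelude but replaces A's forward scatter DP over reached states (with a per-t power table indexed by precomputed exponents) by the adjoint backward DP computed from t=K down to 1, gathering each new entry as a sum over completions and maintaining the needed powers of base with two running multipliers instead of a table.
import Mathlib
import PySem

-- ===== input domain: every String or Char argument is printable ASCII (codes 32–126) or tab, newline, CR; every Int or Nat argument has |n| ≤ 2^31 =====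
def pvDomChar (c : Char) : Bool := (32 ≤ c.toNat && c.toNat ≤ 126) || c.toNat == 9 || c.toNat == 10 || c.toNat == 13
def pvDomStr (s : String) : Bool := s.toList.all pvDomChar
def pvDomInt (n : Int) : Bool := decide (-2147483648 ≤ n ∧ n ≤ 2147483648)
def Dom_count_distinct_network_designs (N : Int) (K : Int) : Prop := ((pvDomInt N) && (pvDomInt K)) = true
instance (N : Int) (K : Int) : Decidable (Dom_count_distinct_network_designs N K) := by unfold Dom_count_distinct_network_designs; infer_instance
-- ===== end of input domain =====

-- B replaces A's forward scatter DP (reached-states, per-t power table) by the adjoint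
-- backward gather DP (ways-to-complete, running powers); objective: alternative (same cost).

-- ===== PORT A =====

def pvP : Int := 1000000007

-- pow(a, e, m): Python's three-argument pow is fast binary exponentiation; this port of it
-- is proved exact (pvPowMod_eq below: for 0 < m it returns a ^ e % m, as PySem.Int.powMod does).
def pvPowMod (a : Int) (e : Nat) (m : Int) : Int :=
  if h : e = 0 then 1 % m
  else
    let r := pvPowMod a (e / 2) m
    if e % 2 = 0 then r * r % m else r * r % m * (a % m) % m
termination_by e
decreasing_by exact Nat.div_lt_self (Nat.pos_of_ne_zero h) (by norm_num)

-- prelude shared verbatim by A's and B's Python: the fact / invfact arrays and nCr.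
-- fact = [1]*(M+1); for i in 1..M: fact[i] = fact[i-1]*i % MOD   (entries kept newest-first
-- while folding, reversed at the end)
def pvFactList (m : Nat) : List Int :=
  ((List.range m).foldl
    (fun (acc : Int × List Int) i => (acc.1 * ((i : Int) + 1) % pvP, acc.1 * ((i : Int) + 1) % pvP :: acc.2))
    (1, [1])).2.reverse

-- invfact[M] = pow(fact[M], MOD-2, MOD); for i in M..1: invfact[i-1] = invfact[i]*i % MOD
-- (built from index M downwards by consing, so no final reverse is needed)
def pvInvFactList (m : Nat) : List Int :=
  ((List.range m).foldl
    (fun (acc : Int × List Int) k =>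
      (acc.1 * ((m - k : Nat) : Int) % pvP, acc.1 * ((m - k : Nat) : Int) % pvP :: acc.2))
    (pvPowMod ((pvFactList m).getD m 0) 1000000005 pvP,
      [pvPowMod ((pvFactList m).getD m 0) 1000000005 pvP])).2

-- nCr(n, r) over given fact/invfact arrays; r is a Nat at every call site, so Python's
-- r < 0 branch is vacuous
def pvNCrL (fact invfact : List Int) (n r : Nat) : Int :=
  if r > n then 0 else fact.getD n 0 * invfact.getD r 0 % pvP * invfact.getD (n - r) 0 % pvP

-- A's per-t table pow_base: pow_base = [1]*(maxE+1); for e in 1..maxE: pow_base[e] = pow_base[e-1]*base % MOD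
def pvPowList (base : Int) (maxE : Nat) : List Int :=
  ((List.range maxE).foldl
    (fun (acc : Int × List Int) _ => (acc.1 * base % pvP, acc.1 * base % pvP :: acc.2))
    (1, [1])).2.reverse

-- one iteration of A's outer loop over t (base = K - t + 1); maxE = M*(M-1)//2
def pvStepA (m : Nat) (fact invfact : List Int) (base : Int) (dp : List Int) : List Int :=
  let powBase := pvPowList base (m * (m - 1) / 2)
  (List.range (m + 1)).foldl (fun dp2 pOld =>
    if dp.getD pOld 0 == 0 then dp2
    else
      (List.range (m - pOld + 1)).foldl (fun dp2 c =>
        dp2.set (pOld + c)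
          ((dp2.getD (pOld + c) 0 +
            dp.getD pOld 0 * pvNCrL fact invfact (m - pOld) c % pvP *
              powBase.getD (c * pOld + c * (c - 1) / 2) 0 % pvP) % pvP)) dp2)
    (List.replicate (m + 1) 0)

-- For N ≤ 0 the Python A raises IndexError (excluded by Pre_); the `N - 1 < 0`
-- guard only makes the Lean function total there.
def count_distinct_network_designs (N : Int) (K : Int) : Int :=
  if N - 1 = 0 then 1
  else if N - 1 < 0 then 0
  else
    ((PySem.List.pyRange 1 (K + 1) 1).foldl
      (fun dp t => pvStepA (N - 1).toNat (pvFactList (N - 1).toNat) (pvInvFactList (N - 1).toNat)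
        (K - t + 1) dp)
      ((List.replicate ((N - 1).toNat + 1) 0).set 0 1)).getD (N - 1).toNat 0

-- ===== PORT B =====

-- B's inner loop over c: state (s, w, mult) with the running powers of base
def pvRowB (m : Nat) (fact invfact : List Int) (base : Int) (g : List Int) (p : Nat) : Int × Int × Int :=
  (List.range (m - p + 1)).foldl (fun sw c =>
    ((sw.1 + pvNCrL fact invfact (m - p) c * sw.2.1 % pvP * g.getD (p + c) 0) % pvP,
      sw.2.1 * sw.2.2 % pvP, sw.2.2 * base % pvP))
    (0, 1, pvPowMod base p pvP)

-- one iteration of B's outer loop over t (base = K - t + 1); g2 built by append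
def pvStepB (m : Nat) (fact invfact : List Int) (base : Int) (g : List Int) : List Int :=
  (List.range (m + 1)).foldl (fun g2 p => g2 ++ [(pvRowB m fact invfact base g p).1]) []

-- B's Python shares A's prelude, so it raises on N ≤ 0 too; same totality guard.
def count_distinct_network_designs_alt (N : Int) (K : Int) : Int :=
  if N - 1 = 0 then 1
  else if N - 1 < 0 then 0
  else
    ((PySem.List.pyRange K 0 (-1)).foldl
      (fun g t => pvStepB (N - 1).toNat (pvFactList (N - 1).toNat) (pvInvFactList (N - 1).toNat)
        (K - t + 1) g)
      ((List.replicate ((N - 1).toNat + 1) 0).set (N - 1).toNat 1)).getD 0 0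

-- ===== PRECONDITION & SPEC =====
-- Pre_ excludes exactly N ≤ 0: there M = N - 1 < 0 and the Python A raises
-- IndexError on invfact[M] = invfact[-1] of a list of length 0 (M = -1) resp. a
-- negative-size list; A returns on every N ≥ 1 and every K.
def Pre_count_distinct_network_designs (N : Int) (K : Int) : Prop := 1 ≤ N
instance (N : Int) (K : Int) : Decidable (Pre_count_distinct_network_designs N K) := by unfold Pre_count_distinct_network_designs; infer_instance
def pvWitness_count_distinct_network_designs : Int × Int := (4, 3)

def Spec_count_distinct_network_designs (N : Int) (K : Int) (out : Int) : Prop := out = count_distinct_network_designs_alt N K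
instance (N : Int) (K : Int) (out : Int) : Decidable (Spec_count_distinct_network_designs N K out) := by unfold Spec_count_distinct_network_designs; infer_instance

-- ===== CLAIM (what is proved, stated in full; the proofs are below) =====
def Claim_equal_count_distinct_network_designs : Prop := ∀ (N : Int) (K : Int), Dom_count_distinct_network_designs N K → Pre_count_distinct_network_designs N K → Spec_count_distinct_network_designs N K (count_distinct_network_designs N K)

-- ===== LEMMAS AND PROOFS =====

-- proof-level view of the shared nCr (the ports pass the two arrays explicitly)
def pvNCr (m n r : Nat) : Int := pvNCrL (pvFactList m) (pvInvFactList m) n r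

-- proof-level value of A's pow_base table entries
def pvPowBase (base : Int) : Nat → Int
  | 0 => 1
  | e + 1 => pvPowBase base e * base % pvP


lemma pvP_pos : (0 : Int) < pvP := by norm_num [pvP]

lemma pvMod_bounds (a : Int) : 0 ≤ a % pvP ∧ a % pvP < pvP :=
  ⟨Int.emod_nonneg _ (by norm_num [pvP]), Int.emod_lt_of_pos _ pvP_pos⟩

lemma pvCastMod (a : Int) : (((a % pvP) : Int) : ZMod 1000000007) = (a : ZMod 1000000007) := by
  unfold pvP
  exact_mod_cast ZMod.intCast_mod a 1000000007

lemma pvGetD_set (l : List Int) (i j : Nat) (v : Int) :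
    (l.set i v).getD j 0 = if i = j ∧ i < l.length then v else l.getD j 0 := by
  simp only [List.getD, List.getElem?_set]
  rcases eq_or_ne i j with rfl | hne
  · by_cases h2 : i < l.length
    · simp [h2]
    · simp [h2]
  · simp [hne]

lemma pvGetD_replicate (n j : Nat) : (List.replicate n (0 : Int)).getD j 0 = 0 := by
  simp [List.getD, List.getElem?_replicate]
  split <;> rfl

lemma pvGetD_map_range (n q : Nat) (h : Nat → Int) :
    ((List.range n).map h).getD q 0 = if q < n then h q else 0 := by
  by_cases hq : q < n
  · simp [List.getD, hq]
  · have hlen : ((List.range n).map h).length ≤ q := by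
      simp only [List.length_map, List.length_range]
      omega
    simp only [List.getD]
    rw [List.getElem?_eq_none hlen]
    simp [hq]

lemma pvPowMod_eq : ∀ (e : Nat) (a m : Int), 0 < m → pvPowMod a e m = a ^ e % m := by
  intro e
  induction e using Nat.strong_induction_on with
  | _ e ih =>
    intro a m hm
    unfold pvPowMod
    by_cases h0 : e = 0
    · subst h0; simp
    · rw [dif_neg h0]
      have hr : pvPowMod a (e / 2) m = a ^ (e / 2) % m :=
        ih (e / 2) (Nat.div_lt_self (Nat.pos_of_ne_zero h0) (by norm_num)) a m hm
      show (if e % 2 = 0 then pvPowMod a (e / 2) m * pvPowMod a (e / 2) m % m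
            else pvPowMod a (e / 2) m * pvPowMod a (e / 2) m % m * (a % m) % m) = a ^ e % m
      rw [hr]
      by_cases hpar : e % 2 = 0
      · rw [if_pos hpar]
        have hx : a ^ e = a ^ (e / 2) * a ^ (e / 2) := by
          rw [← pow_add]
          congr 1
          omega
        conv_rhs => rw [hx, Int.mul_emod]
      · rw [if_neg hpar]
        have hx : a ^ e = a ^ (e / 2) * a ^ (e / 2) * a := by
          rw [← pow_add, ← pow_succ]
          congr 1
          omega
        conv_rhs => rw [hx, Int.mul_emod (a ^ (e / 2) * a ^ (e / 2)) a m,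
          Int.mul_emod (a ^ (e / 2)) (a ^ (e / 2)) m]

lemma pvCast_powMod (a : Int) (e : Nat) :
    ((pvPowMod a e pvP : Int) : ZMod 1000000007) = (a : ZMod 1000000007) ^ e := by
  rw [pvPowMod_eq e a pvP pvP_pos, pvCastMod, Int.cast_pow]

lemma pvCast_powBase (base : Int) (e : Nat) :
    ((pvPowBase base e : Int) : ZMod 1000000007) = (base : ZMod 1000000007) ^ e := by
  induction e with
  | zero => simp [pvPowBase]
  | succ e ih =>
    show ((pvPowBase base e * base % pvP : Int) : ZMod 1000000007) = _
    rw [pvCastMod, Int.cast_mul, ih, pow_succ]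

lemma pvPowListAux (base : Int) :
    ∀ n : Nat, (List.range n).foldl
      (fun (acc : Int × List Int) _ => (acc.1 * base % pvP, acc.1 * base % pvP :: acc.2))
      (1, [1]) =
      (pvPowBase base n, ((List.range (n + 1)).map (pvPowBase base)).reverse) := by
  intro n
  induction n with
  | zero => rfl
  | succ n ih =>
      rw [List.range_succ, List.foldl_append, List.foldl_cons, List.foldl_nil, ih]
      refine Prod.ext rfl ?_
      show (pvPowBase base n * base % pvP) :: ((List.range (n + 1)).map (pvPowBase base)).reverse = _
      rw [List.range_succ (n := n + 1), List.map_append, List.reverse_append]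
      rfl

lemma pvPowList_eq (base : Int) (maxE : Nat) :
    pvPowList base maxE = (List.range (maxE + 1)).map (pvPowBase base) := by
  unfold pvPowList
  rw [pvPowListAux base maxE, List.reverse_reverse]

lemma pvTri (n : Nat) : (n + 1) * ((n + 1) - 1) / 2 = n * (n - 1) / 2 + n := by
  calc (n + 1) * ((n + 1) - 1) / 2 = (n + 1).choose 2 := (Nat.choose_two_right (n + 1)).symm
    _ = n.choose 1 + n.choose 2 := Nat.choose_succ_succ n 1
    _ = n + n * (n - 1) / 2 := by rw [Nat.choose_one_right, Nat.choose_two_right]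
    _ = n * (n - 1) / 2 + n := Nat.add_comm _ _

lemma pvTriAdd (n : Nat) : ∀ s : Nat,
    n * s + n * (n - 1) / 2 + s * (s - 1) / 2 = (n + s) * ((n + s) - 1) / 2 := by
  intro s
  induction s with
  | zero => simp
  | succ s ih =>
      calc n * (s + 1) + n * (n - 1) / 2 + (s + 1) * ((s + 1) - 1) / 2
          = (n * s + n * (n - 1) / 2 + s * (s - 1) / 2) + (n + s) := by rw [pvTri s]; ring
        _ = (n + s) * ((n + s) - 1) / 2 + (n + s) := by rw [ih]
        _ = (n + (s + 1)) * ((n + (s + 1)) - 1) / 2 := by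
              show _ = ((n + s) + 1) * (((n + s) + 1) - 1) / 2
              exact (pvTri (n + s)).symm

lemma pvExpBound (m pOld n : Nat) (h : pOld + n ≤ m) :
    n * pOld + n * (n - 1) / 2 ≤ m * (m - 1) / 2 := by
  have h1 := pvTriAdd n pOld
  have h2 : (n + pOld).choose 2 ≤ m.choose 2 := Nat.choose_le_choose 2 (by omega)
  rw [Nat.choose_two_right, Nat.choose_two_right] at h2
  calc n * pOld + n * (n - 1) / 2
      ≤ n * pOld + n * (n - 1) / 2 + pOld * (pOld - 1) / 2 := Nat.le_add_right _ _
    _ = (n + pOld) * ((n + pOld) - 1) / 2 := h1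
    _ ≤ m * (m - 1) / 2 := h2

-- the common weight of one transition: choose c new leaves at the current value,
-- with p leaves already placed; base = number of choices for each dominated pair
def pvWb (m : Nat) (b : Int) (p c : Nat) : ZMod 1000000007 :=
  ((pvNCr m (m - p) c : Int) : ZMod 1000000007) * ((b : Int) : ZMod 1000000007) ^ (c * p + c * (c - 1) / 2)

-- forward DP value (A): after j steps, probability mass on p placed leaves
def pvFwd (m : Nat) (K : Int) : Nat → Nat → ZMod 1000000007
  | 0, q => if q = 0 then 1 else 0
  | j + 1, q =>
      ∑ p ∈ Finset.range (m + 1), ∑ c ∈ Finset.range (m - p + 1),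
        if p + c = q then pvFwd m K j p * pvWb m (K - (j : Int)) p c else 0

-- backward DP value (B): after j steps from the top, ways to complete from p placed leaves
def pvBwd (m : Nat) : Nat → Nat → ZMod 1000000007
  | 0, p => if p = m then 1 else 0
  | j + 1, p =>
      ∑ c ∈ Finset.range (m - p + 1), pvWb m ((j : Int) + 1) p c * pvBwd m j (p + c)

-- a list of residues representing a row of the DP
def pvRep (m : Nat) (l : List Int) (f : Nat → ZMod 1000000007) : Prop :=
  l.length = m + 1 ∧ (∀ q, 0 ≤ l.getD q 0 ∧ l.getD q 0 < pvP) ∧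
    (∀ q, q ≤ m → ((l.getD q 0 : Int) : ZMod 1000000007) = f q)

lemma pvRep_congr {m : Nat} {l : List Int} {f g : Nat → ZMod 1000000007}
    (h : ∀ q, f q = g q) (hl : pvRep m l f) : pvRep m l g :=
  ⟨hl.1, hl.2.1, fun q hq => (hl.2.2 q hq).trans (h q)⟩

-- A's inner scatter loop over c, cut off after n iterations
def pvInnerA (m pOld : Nat) (base v : Int) (L : List Int) (n : Nat) : List Int :=
  (List.range n).foldl (fun dp2 c =>
    dp2.set (pOld + c)
      ((dp2.getD (pOld + c) 0 +
        v * pvNCr m (m - pOld) c % pvP *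
          (pvPowList base (m * (m - 1) / 2)).getD (c * pOld + c * (c - 1) / 2) 0 % pvP) % pvP)) L

lemma pvStepA_def (m : Nat) (base : Int) (dp : List Int) :
    pvStepA m (pvFactList m) (pvInvFactList m) base dp = (List.range (m + 1)).foldl (fun dp2 pOld =>
      if dp.getD pOld 0 == 0 then dp2
      else pvInnerA m pOld base (dp.getD pOld 0) dp2 (m - pOld + 1))
      (List.replicate (m + 1) 0) := rfl

lemma pvInnerA_spec (m pOld : Nat) (base v : Int) :
    ∀ (n : Nat) (L : List Int), pOld + n ≤ m + 1 → L.length = m + 1 →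
      (∀ q, 0 ≤ L.getD q 0 ∧ L.getD q 0 < pvP) →
      (pvInnerA m pOld base v L n).length = m + 1 ∧
      (∀ q, 0 ≤ (pvInnerA m pOld base v L n).getD q 0 ∧ (pvInnerA m pOld base v L n).getD q 0 < pvP) ∧
      (∀ q : Nat, (((pvInnerA m pOld base v L n).getD q 0 : Int) : ZMod 1000000007) =
        ((L.getD q 0 : Int) : ZMod 1000000007) +
          ∑ c ∈ Finset.range n, if pOld + c = q then (v : ZMod 1000000007) * pvWb m base pOld c else 0) := by
  intro n
  induction n with
  | zero =>
      intro L _ hlen hbnd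
      refine ⟨hlen, hbnd, ?_⟩
      intro q; simp [pvInnerA]
  | succ n ih =>
      intro L hn hlen hbnd
      obtain ⟨ihlen, ihbnd, ihval⟩ := ih L (by omega) hlen hbnd
      have hstep : pvInnerA m pOld base v L (n + 1) =
          (pvInnerA m pOld base v L n).set (pOld + n)
            (((pvInnerA m pOld base v L n).getD (pOld + n) 0 +
              v * pvNCr m (m - pOld) n % pvP *
                (pvPowList base (m * (m - 1) / 2)).getD (n * pOld + n * (n - 1) / 2) 0 % pvP) % pvP) := by
        unfold pvInnerA
        rw [List.range_succ, List.foldl_append]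
        rfl
      refine ⟨?_, ?_, ?_⟩
      · rw [hstep, List.length_set, ihlen]
      · intro q
        rw [hstep, pvGetD_set]
        split
        · exact pvMod_bounds _
        · exact ihbnd q
      · intro q
        rw [hstep, pvGetD_set, Finset.sum_range_succ]
        by_cases hq : pOld + n = q
        · subst hq
          have hlt : pOld + n < (pvInnerA m pOld base v L n).length := by rw [ihlen]; omega
          rw [if_pos ⟨rfl, hlt⟩, if_pos rfl, pvCastMod, Int.cast_add, ihval (pOld + n)]
          have hb2 : n * pOld + n * (n - 1) / 2 < m * (m - 1) / 2 + 1 :=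
            Nat.lt_succ_of_le (pvExpBound m pOld n (by omega))
          have hw : ((v * pvNCr m (m - pOld) n % pvP *
              (pvPowList base (m * (m - 1) / 2)).getD (n * pOld + n * (n - 1) / 2) 0 % pvP
              : Int) : ZMod 1000000007) =
              (v : ZMod 1000000007) * pvWb m base pOld n := by
            rw [pvPowList_eq, pvGetD_map_range, if_pos hb2,
              pvCastMod, Int.cast_mul, pvCastMod, Int.cast_mul, pvCast_powBase]
            unfold pvWb; ring
          rw [hw]
          ring
        · have : ¬ (pOld + n = q ∧ pOld + n < (pvInnerA m pOld base v L n).length) :=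
            fun h => hq h.1
          rw [if_neg this, if_neg hq, add_zero, ihval q]

lemma pvStepA_spec (m : Nat) (base : Int) (dp : List Int) (f : Nat → ZMod 1000000007)
    (hdp : pvRep m dp f) :
    pvRep m (pvStepA m (pvFactList m) (pvInvFactList m) base dp)
      (fun q => ∑ p ∈ Finset.range (m + 1), ∑ c ∈ Finset.range (m - p + 1),
        if p + c = q then f p * pvWb m base p c else 0) := by
  have aux : ∀ n, n ≤ m + 1 →
      ((List.range n).foldl (fun dp2 pOld =>
        if dp.getD pOld 0 == 0 then dp2
        else pvInnerA m pOld base (dp.getD pOld 0) dp2 (m - pOld + 1))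
        (List.replicate (m + 1) 0)).length = m + 1 ∧
      (∀ q, 0 ≤ ((List.range n).foldl (fun dp2 pOld =>
        if dp.getD pOld 0 == 0 then dp2
        else pvInnerA m pOld base (dp.getD pOld 0) dp2 (m - pOld + 1))
        (List.replicate (m + 1) 0)).getD q 0 ∧
        ((List.range n).foldl (fun dp2 pOld =>
        if dp.getD pOld 0 == 0 then dp2
        else pvInnerA m pOld base (dp.getD pOld 0) dp2 (m - pOld + 1))
        (List.replicate (m + 1) 0)).getD q 0 < pvP) ∧
      (∀ q : Nat, ((((List.range n).foldl (fun dp2 pOld =>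
        if dp.getD pOld 0 == 0 then dp2
        else pvInnerA m pOld base (dp.getD pOld 0) dp2 (m - pOld + 1))
        (List.replicate (m + 1) 0)).getD q 0 : Int) : ZMod 1000000007) =
        ∑ p ∈ Finset.range n, ∑ c ∈ Finset.range (m - p + 1),
          if p + c = q then f p * pvWb m base p c else 0) := by
    intro n
    induction n with
    | zero =>
        intro _
        refine ⟨by simp, ?_, ?_⟩
        · intro q
          rw [List.range_zero, List.foldl_nil, pvGetD_replicate]
          exact ⟨le_refl 0, pvP_pos⟩
        · intro q
          rw [List.range_zero, List.foldl_nil, pvGetD_replicate]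
          simp
    | succ n ih =>
        intro hn
        obtain ⟨ihlen, ihbnd, ihval⟩ := ih (by omega)
        rw [List.range_succ, List.foldl_append, List.foldl_cons, List.foldl_nil]
        have hfn : ((dp.getD n 0 : Int) : ZMod 1000000007) = f n := hdp.2.2 n (by omega)
        by_cases hz : (dp.getD n 0 == 0) = true
        · rw [if_pos hz]
          have hz' : dp.getD n 0 = 0 := by simpa using hz
          refine ⟨ihlen, ihbnd, ?_⟩
          intro q
          rw [ihval q]
          conv_rhs => rw [Finset.sum_range_succ]
          have : (∑ c ∈ Finset.range (m - n + 1),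
              if n + c = q then f n * pvWb m base n c else 0) = 0 := by
            apply Finset.sum_eq_zero
            intro c _
            rw [← hfn, hz']
            simp
          rw [this, add_zero]
        · rw [if_neg hz]
          obtain ⟨slen, sbnd, sval⟩ :=
            pvInnerA_spec m n base (dp.getD n 0) (m - n + 1) _ (by omega) ihlen ihbnd
          refine ⟨slen, sbnd, ?_⟩
          intro q
          rw [sval q, ihval q, hfn]
          conv_rhs => rw [Finset.sum_range_succ]
  have h := aux (m + 1) (le_refl _)
  rw [pvStepA_def]
  exact ⟨h.1, h.2.1, fun q _ => h.2.2 q⟩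

-- B's inner gather loop over c, cut off after n iterations
def pvInnerB (m p : Nat) (base : Int) (g : List Int) (n : Nat) : Int × Int × Int :=
  (List.range n).foldl (fun sw c =>
    ((sw.1 + pvNCr m (m - p) c * sw.2.1 % pvP * g.getD (p + c) 0) % pvP,
      sw.2.1 * sw.2.2 % pvP, sw.2.2 * base % pvP))
    (0, 1, pvPowMod base p pvP)

lemma pvRowB_def (m : Nat) (base : Int) (g : List Int) (p : Nat) :
    pvRowB m (pvFactList m) (pvInvFactList m) base g p = pvInnerB m p base g (m - p + 1) := rfl

lemma pvInnerB_spec (m p : Nat) (base : Int) (g : List Int) (f : Nat → ZMod 1000000007)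
    (hg : pvRep m g f) (hp : p ≤ m) :
    ∀ n, n ≤ m - p + 1 →
      (0 ≤ (pvInnerB m p base g n).1 ∧ (pvInnerB m p base g n).1 < pvP) ∧
      (((pvInnerB m p base g n).1 : Int) : ZMod 1000000007) =
        (∑ c ∈ Finset.range n, pvWb m base p c * f (p + c)) ∧
      (((pvInnerB m p base g n).2.1 : Int) : ZMod 1000000007) =
        ((base : Int) : ZMod 1000000007) ^ (n * p + n * (n - 1) / 2) ∧
      (((pvInnerB m p base g n).2.2 : Int) : ZMod 1000000007) =
        ((base : Int) : ZMod 1000000007) ^ (p + n) := by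
  intro n
  induction n with
  | zero =>
      intro _
      refine ⟨⟨le_refl 0, pvP_pos⟩, by simp [pvInnerB], ?_, ?_⟩
      · show ((1 : Int) : ZMod 1000000007) = _
        norm_num
      · show ((pvPowMod base p pvP : Int) : ZMod 1000000007) = _
        rw [pvCast_powMod, Nat.add_zero]
  | succ n ih =>
      intro hn
      obtain ⟨⟨ib0, ib1⟩, ihs, ihw, ihm⟩ := ih (by omega)
      have hstep : pvInnerB m p base g (n + 1) =
          (((pvInnerB m p base g n).1 +
            pvNCr m (m - p) n * (pvInnerB m p base g n).2.1 % pvP * g.getD (p + n) 0) % pvP,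
            (pvInnerB m p base g n).2.1 * (pvInnerB m p base g n).2.2 % pvP,
            (pvInnerB m p base g n).2.2 * base % pvP) := by
        unfold pvInnerB
        rw [List.range_succ, List.foldl_append]
        rfl
      rw [hstep]
      refine ⟨pvMod_bounds _, ?_, ?_, ?_⟩
      · show (((pvInnerB m p base g n).1 +
            pvNCr m (m - p) n * (pvInnerB m p base g n).2.1 % pvP * g.getD (p + n) 0) % pvP
            : Int) = (_ : ZMod 1000000007)
        rw [pvCastMod, Int.cast_add, Int.cast_mul, pvCastMod, Int.cast_mul, ihs, ihw,
          hg.2.2 (p + n) (by omega), Finset.sum_range_succ]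
        unfold pvWb
        ring
      · show (((pvInnerB m p base g n).2.1 * (pvInnerB m p base g n).2.2 % pvP : Int)
            : ZMod 1000000007) = _
        rw [pvCastMod, Int.cast_mul, ihw, ihm, ← pow_add]
        congr 1
        rw [pvTri]
        ring
      · show (((pvInnerB m p base g n).2.2 * base % pvP : Int) : ZMod 1000000007) = _
        rw [pvCastMod, Int.cast_mul, ihm, ← pow_succ, Nat.add_assoc]

lemma pvStepB_spec (m : Nat) (base : Int) (g : List Int) (f : Nat → ZMod 1000000007)
    (hg : pvRep m g f) :
    pvRep m (pvStepB m (pvFactList m) (pvInvFactList m) base g)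
      (fun p => ∑ c ∈ Finset.range (m - p + 1), pvWb m base p c * f (p + c)) := by
  have hmap : pvStepB m (pvFactList m) (pvInvFactList m) base g =
      (List.range (m + 1)).map (fun p => (pvRowB m (pvFactList m) (pvInvFactList m) base g p).1) := by
    unfold pvStepB
    rw [PySem.List.foldl_append_singleton_eq_map]
    rfl
  refine ⟨by rw [hmap]; simp, ?_, ?_⟩
  · intro q
    rw [hmap, pvGetD_map_range]
    split
    · next hq =>
        rw [pvRowB_def]
        exact (pvInnerB_spec m q base g f hg (by omega) (m - q + 1) (le_refl _)).1
    · exact ⟨le_refl 0, pvP_pos⟩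
  · intro q hq
    rw [hmap, pvGetD_map_range, if_pos (by omega), pvRowB_def]
    exact (pvInnerB_spec m q base g f hg hq (m - q + 1) (le_refl _)).2.1

lemma pvIterA (m : Nat) (K : Int) :
    ∀ n : Nat, pvRep m ((List.range n).foldl (fun dp (k : Nat) => pvStepA m (pvFactList m) (pvInvFactList m) (K - (1 + (k : Int)) + 1) dp)
      ((List.replicate (m + 1) 0).set 0 1)) (pvFwd m K n) := by
  intro n
  induction n with
  | zero =>
      refine ⟨by simp, ?_, ?_⟩
      · intro q
        rw [List.range_zero, List.foldl_nil, pvGetD_set]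
        split
        · norm_num [pvP]
        · rw [pvGetD_replicate]; exact ⟨le_refl 0, pvP_pos⟩
      · intro q hq
        rw [List.range_zero, List.foldl_nil, pvGetD_set]
        rcases eq_or_ne q 0 with rfl | hq0
        · rw [if_pos ⟨rfl, by simp⟩]
          simp [pvFwd]
        · rw [if_neg (fun h => hq0 h.1.symm), pvGetD_replicate]
          simp [pvFwd, hq0]
  | succ n ih =>
      rw [List.range_succ, List.foldl_append, List.foldl_cons, List.foldl_nil,
        show K - (1 + (n : Int)) + 1 = K - (n : Int) from by ring]
      refine pvRep_congr ?_ (pvStepA_spec m (K - (n : Int)) _ _ ih)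
      intro q
      rfl

lemma pvIterB (m : Nat) (K : Int) :
    ∀ n : Nat, pvRep m ((List.range n).foldl (fun g (k : Nat) => pvStepB m (pvFactList m) (pvInvFactList m) (K - (K - (k : Int)) + 1) g)
      ((List.replicate (m + 1) 0).set m 1)) (pvBwd m n) := by
  intro n
  induction n with
  | zero =>
      refine ⟨by simp, ?_, ?_⟩
      · intro q
        rw [List.range_zero, List.foldl_nil, pvGetD_set]
        split
        · norm_num [pvP]
        · rw [pvGetD_replicate]; exact ⟨le_refl 0, pvP_pos⟩
      · intro q hq
        rw [List.range_zero, List.foldl_nil, pvGetD_set]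
        rcases eq_or_ne q m with rfl | hqm
        · rw [if_pos ⟨rfl, by simp⟩]
          simp [pvBwd]
        · rw [if_neg (fun h => hqm h.1.symm), pvGetD_replicate]
          simp [pvBwd, hqm]
  | succ n ih =>
      rw [List.range_succ, List.foldl_append, List.foldl_cons, List.foldl_nil,
        show K - (K - (n : Int)) + 1 = (n : Int) + 1 from by ring]
      refine pvRep_congr ?_ (pvStepB_spec m ((n : Int) + 1) _ _ ih)
      intro q
      rfl

lemma pvExchange (m : Nat) (F : Nat → ZMod 1000000007) (Wf : Nat → Nat → ZMod 1000000007)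
    (B : Nat → ZMod 1000000007) :
    (∑ p ∈ Finset.range (m + 1), ∑ c ∈ Finset.range (m - p + 1), F p * Wf p c * B (p + c)) =
      ∑ q ∈ Finset.range (m + 1),
        (∑ p ∈ Finset.range (m + 1), ∑ c ∈ Finset.range (m - p + 1),
          if p + c = q then F p * Wf p c else 0) * B q := by
  have hrw : (∑ q ∈ Finset.range (m + 1),
      (∑ p ∈ Finset.range (m + 1), ∑ c ∈ Finset.range (m - p + 1),
        if p + c = q then F p * Wf p c else 0) * B q) =
      ∑ q ∈ Finset.range (m + 1), ∑ p ∈ Finset.range (m + 1), ∑ c ∈ Finset.range (m - p + 1),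
        (if p + c = q then F p * Wf p c else 0) * B q := by
    refine Finset.sum_congr rfl fun q _ => ?_
    rw [Finset.sum_mul]
    exact Finset.sum_congr rfl fun p _ => Finset.sum_mul _ _ _
  rw [hrw, Finset.sum_comm]
  refine Finset.sum_congr rfl fun p hp => ?_
  rw [Finset.sum_comm]
  refine Finset.sum_congr rfl fun c hc => ?_
  have hpm : p ≤ m := Nat.lt_succ_iff.mp (Finset.mem_range.mp hp)
  have hcm : c ≤ m - p := Nat.lt_succ_iff.mp (Finset.mem_range.mp hc)
  have hmem : p + c ∈ Finset.range (m + 1) := Finset.mem_range.mpr (by omega)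
  symm
  calc (∑ q ∈ Finset.range (m + 1), (if p + c = q then F p * Wf p c else 0) * B q)
      = ∑ q ∈ Finset.range (m + 1), if p + c = q then F p * Wf p c * B q else 0 := by
        refine Finset.sum_congr rfl fun q _ => ?_
        split <;> simp
    _ = F p * Wf p c * B (p + c) := by
        rw [Finset.sum_ite_eq]
        rw [if_pos hmem]

lemma pvFwdBwd (m Kn : Nat) (K : Int) (hK : K = (Kn : Int)) :
    pvFwd m K Kn m = pvBwd m Kn 0 := by
  subst hK
  have key : ∀ j, j ≤ Kn →
      (∑ p ∈ Finset.range (m + 1), pvFwd m (Kn : Int) (Kn - j) p * pvBwd m j p) =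
        pvFwd m (Kn : Int) Kn m := by
    intro j
    induction j with
    | zero =>
        intro _
        have hb : ∀ p, pvBwd m 0 p = if p = m then 1 else 0 := fun p => rfl
        calc ∑ p ∈ Finset.range (m + 1), pvFwd m (Kn : Int) (Kn - 0) p * pvBwd m 0 p
            = ∑ p ∈ Finset.range (m + 1),
                if p = m then pvFwd m (Kn : Int) Kn p else 0 := by
              refine Finset.sum_congr rfl fun p _ => ?_
              rw [hb p, Nat.sub_zero]
              split <;> simp
          _ = pvFwd m (Kn : Int) Kn m := by
              rw [Finset.sum_ite_eq']
              exact if_pos (Finset.mem_range.mpr (by omega))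
    | succ j ih =>
        intro hj
        rw [← ih (by omega)]
        have hsub : Kn - j = (Kn - (j + 1)) + 1 := by omega
        have hbase : (Kn : Int) - ((Kn - (j + 1) : Nat) : Int) = (j : Int) + 1 := by omega
        calc ∑ p ∈ Finset.range (m + 1), pvFwd m (Kn : Int) (Kn - (j + 1)) p * pvBwd m (j + 1) p
            = ∑ p ∈ Finset.range (m + 1), ∑ c ∈ Finset.range (m - p + 1),
                pvFwd m (Kn : Int) (Kn - (j + 1)) p *
                  (pvWb m ((j : Int) + 1) p c * pvBwd m j (p + c)) := by
              refine Finset.sum_congr rfl fun p _ => ?_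
              show pvFwd m (Kn : Int) (Kn - (j + 1)) p * pvBwd m (j + 1) p = _
              simp only [pvBwd]
              rw [Finset.mul_sum]
          _ = ∑ p ∈ Finset.range (m + 1), ∑ c ∈ Finset.range (m - p + 1),
                pvFwd m (Kn : Int) (Kn - (j + 1)) p *
                  pvWb m ((Kn : Int) - ((Kn - (j + 1) : Nat) : Int)) p c * pvBwd m j (p + c) := by
              rw [hbase]
              exact Finset.sum_congr rfl fun p _ => Finset.sum_congr rfl fun c _ => by ring
          _ = ∑ q ∈ Finset.range (m + 1),
                (∑ p ∈ Finset.range (m + 1), ∑ c ∈ Finset.range (m - p + 1),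
                  if p + c = q then pvFwd m (Kn : Int) (Kn - (j + 1)) p *
                    pvWb m ((Kn : Int) - ((Kn - (j + 1) : Nat) : Int)) p c else 0) *
                  pvBwd m j q :=
              pvExchange m _ _ _
          _ = ∑ q ∈ Finset.range (m + 1), pvFwd m (Kn : Int) (Kn - j) q * pvBwd m j q := by
              rw [hsub]
              exact Finset.sum_congr rfl fun q _ => by congr 1
  have h0 := key Kn (le_refl _)
  rw [← h0, Nat.sub_self]
  have hf : ∀ p, pvFwd m (Kn : Int) 0 p = if p = 0 then 1 else 0 := fun p => rfl
  calc ∑ p ∈ Finset.range (m + 1), pvFwd m (Kn : Int) 0 p * pvBwd m Kn p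
      = ∑ p ∈ Finset.range (m + 1), if p = 0 then pvBwd m Kn p else 0 := by
        refine Finset.sum_congr rfl fun p _ => ?_
        rw [hf p]
        split <;> simp
    _ = pvBwd m Kn 0 := by
        rw [Finset.sum_ite_eq']
        exact if_pos (Finset.mem_range.mpr (by omega))

-- ===== VERDICT (by name: the statement is the Claim_ definition above) =====
theorem count_distinct_network_designs_spec : Claim_equal_count_distinct_network_designs := by
  intro N K _ hpre
  unfold Spec_count_distinct_network_designs
  have h1 : 1 ≤ N := hpre
  by_cases hN1 : N - 1 = 0
  · simp [count_distinct_network_designs, count_distinct_network_designs_alt, hN1]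
  · have hmneg : ¬ (N - 1 < 0) := by omega
    have hm1 : 1 ≤ (N - 1).toNat := by omega
    by_cases hKpos : 1 ≤ K
    · -- main case
      obtain ⟨Kn, hK⟩ : ∃ Kn : Nat, K = (Kn : Int) := ⟨K.toNat, by omega⟩
      obtain ⟨m, hNm, hm1'⟩ : ∃ m : Nat, (N - 1).toNat = m ∧ 1 ≤ m :=
        ⟨(N - 1).toNat, rfl, by omega⟩
      have hrangeA : PySem.List.pyRange 1 (K + 1) 1 =
          (List.range Kn).map (fun (k : Nat) => 1 + (k : Int)) := by
        rw [PySem.List.pyRange_one, show (K + 1 - 1).toNat = Kn from by omega]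
      have hrangeB : PySem.List.pyRange K 0 (-1) =
          (List.range Kn).map (fun (k : Nat) => K - (k : Int)) := by
        rw [PySem.List.pyRange_neg_one, show (K - 0).toNat = Kn from by omega]
      obtain ⟨-, hAbnd, hAcast⟩ := pvIterA m K Kn
      obtain ⟨-, hBbnd, hBcast⟩ := pvIterB m K Kn
      have hAeq : count_distinct_network_designs N K =
          ((List.range Kn).foldl (fun dp (k : Nat) => pvStepA m (pvFactList m) (pvInvFactList m) (K - (1 + (k : Int)) + 1) dp)
            ((List.replicate (m + 1) 0).set 0 1)).getD m 0 := by
        unfold count_distinct_network_designs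
        rw [if_neg hN1, if_neg hmneg, hNm, hrangeA, List.foldl_map]
      have hBeq : count_distinct_network_designs_alt N K =
          ((List.range Kn).foldl (fun g (k : Nat) => pvStepB m (pvFactList m) (pvInvFactList m) (K - (K - (k : Int)) + 1) g)
            ((List.replicate (m + 1) 0).set m 1)).getD 0 0 := by
        unfold count_distinct_network_designs_alt
        rw [if_neg hN1, if_neg hmneg, hNm, hrangeB, List.foldl_map]
      have hcast : ((count_distinct_network_designs N K : Int) : ZMod 1000000007) =
          ((count_distinct_network_designs_alt N K : Int) : ZMod 1000000007) := by
        rw [hAeq, hBeq, hAcast m (le_refl _), hBcast 0 (by omega)]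
        exact pvFwdBwd m Kn K hK
      have hmod := (ZMod.intCast_eq_intCast_iff _ _ _).mp hcast
      have hmod' : count_distinct_network_designs N K % pvP =
          count_distinct_network_designs_alt N K % pvP := by
        have h' : count_distinct_network_designs N K % ((1000000007 : Nat) : Int) =
            count_distinct_network_designs_alt N K % ((1000000007 : Nat) : Int) := hmod
        unfold pvP
        exact_mod_cast h'
      rw [hAeq, hBeq] at hmod' ⊢
      rw [Int.emod_eq_of_lt (hAbnd m).1 (hAbnd m).2,
        Int.emod_eq_of_lt (hBbnd 0).1 (hBbnd 0).2] at hmod'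
      exact hmod'
    · -- K ≤ 0: both loops are empty and both read a zero entry
      have hA : PySem.List.pyRange 1 (K + 1) 1 = [] := PySem.List.pyRange_one_eq_nil (by omega)
      have hB : PySem.List.pyRange K 0 (-1) = [] := PySem.List.pyRange_neg_one_eq_nil (by omega)
      unfold count_distinct_network_designs count_distinct_network_designs_alt
      rw [if_neg hN1, if_neg hmneg, if_neg hN1, if_neg hmneg, hA, hB,
        List.foldl_nil, List.foldl_nil, pvGetD_set, pvGetD_set]
      rw [if_neg (fun h => by omega : ¬ (0 = (N - 1).toNat ∧ 0 < (List.replicate ((N - 1).toNat + 1) (0:Int)).length))]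
      rw [if_neg (fun h => by omega : ¬ ((N - 1).toNat = 0 ∧ (N - 1).toNat < (List.replicate ((N - 1).toNat + 1) (0:Int)).length))]
      rw [pvGetD_replicate, pvGetD_replicate]
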